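-- pv_equiv track=rewrite | github.com/pypi-data/pypi-mirror-51 | packages/clinphen/clinphen-1.28-py2-none-any.whl/clinphen_src/get_phenotypes.py | load_medical_record_linewise
-- ===== SOURCE A (Python) =====
-- point_enders = [".", u'•', '•', ";", "\t"]
--
-- def end_of_point(word):
--   #for char in point_enders:
--   #  if char in word: return True
--   if word[-1] in point_enders: return True
--   if word == "but": return True
--   if word == "except": return True
--   if word == "however": return True
--   if word == "though": return True
--   return False
--
-- subpoint_enders = [",", ":"]
--
-- def end_of_subpoint(word):
--   if word[-1] in subpoint_enders: return True
--   if word == "and": return True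
--   return False
--
-- def string_to_record_linewise(medical_record):
--   return medical_record.split("\n")
--
-- def load_medical_record_linewise(medical_record):
--   recordFile = string_to_record_linewise(medical_record)
--   sentences = []
--   for line in recordFile:
--     if ":" not in line: continue
--     curSentence = []
--     for word in line.strip().split(" "):
--       word = word.lower()
--       if len(word) < 1: continue
--       curSentence.append(word)
--       if end_of_point(word):
--         sentences.append(" ".join(curSentence))
--         curSentence = []
--     if len(curSentence) > 0: sentences.append(" ".join(curSentence))
--   subsentence_sets = []
--   for sent in sentences:
--     subsents = []
--     curSubsent = []
--     for word in sent.split(" "):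
--       word = word.lower()
--       curSubsent.append(word)
--       if end_of_subpoint(word):
--         subsents.append(" ".join(curSubsent))
--         curSubsent = []
--     if len(curSubsent) > 0: subsents.append(" ".join(curSubsent))
--     subsentence_sets.append(subsents)
--   return subsentence_sets
-- ===== SOURCE B (Python) =====
-- _POINT_CHARS = {".", '\u2022', ";", "\t"}
-- _POINT_WORDS = {"but", "except", "however", "though"}
-- _SUB_CHARS = {",", ":"}
--
-- def _ends_point(word):
--   return word[-1] in _POINT_CHARS or word in _POINT_WORDS
--
-- def _ends_subpoint(word):
--   return word[-1] in _SUB_CHARS or word == "and"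
--
-- def load_medical_record_linewise(medical_record):
--   result = []
--   for line in medical_record.split("\n"):
--     if ":" not in line:
--       continue
--     curSentence = []
--     curSubsent = []
--     for raw in line.strip().split(" "):
--       word = raw.lower()
--       if not word:
--         continue
--       curSubsent.append(word)
--       if _ends_point(word):
--         curSentence.append(" ".join(curSubsent))
--         curSubsent = []
--         result.append(curSentence)
--         curSentence = []
--       elif _ends_subpoint(word):
--         curSentence.append(" ".join(curSubsent))
--         curSubsent = []
--     if curSubsent:
--       curSentence.append(" ".join(curSubsent))
--     if curSentence:
--       result.append(curSentence)
--   return result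
-- ===== Notes on version B (the rewrite author's own statement) =====
-- stated objective: alternative
-- what changed: Fused A's two sequential passes (build joined sentence strings, then re-split and re-lowercase each sentence to group subsentences) into one streaming traversal per line that maintains the current subsentence word buffer and the current sentence's subsentence list, so no sentence string is ever joined, re-split or re-lowercased.
import Mathlib
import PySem

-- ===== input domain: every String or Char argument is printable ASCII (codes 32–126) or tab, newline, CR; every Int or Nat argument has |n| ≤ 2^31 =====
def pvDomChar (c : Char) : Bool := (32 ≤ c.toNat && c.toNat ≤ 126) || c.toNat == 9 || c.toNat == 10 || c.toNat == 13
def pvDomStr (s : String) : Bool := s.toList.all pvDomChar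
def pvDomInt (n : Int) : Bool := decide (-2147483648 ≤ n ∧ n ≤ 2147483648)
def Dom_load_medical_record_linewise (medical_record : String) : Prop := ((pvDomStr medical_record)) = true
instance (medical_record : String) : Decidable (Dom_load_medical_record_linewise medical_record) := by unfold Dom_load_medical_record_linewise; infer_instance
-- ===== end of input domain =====

-- B fuses A's two passes (join sentences, then re-split/re-lowercase into subsentences)
-- into one streaming traversal over the words of each line; return values proved equal.


-- ===== PORT A =====
def point_enders : List String := [".", "\u2022", "\u2022", ";", "\t"]

-- word[-1] raises IndexError in Python on the empty string; both programs only apply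
-- end_of_point / end_of_subpoint to nonempty words, so the 'none' branch is never reached.
def end_of_point (word : String) : Bool :=
  match PySem.Str.pyGet? word (-1) with
  | none => false
  | some c =>
    if point_enders.contains (String.ofList [c]) then true
    else if word == "but" then true
    else if word == "except" then true
    else if word == "however" then true
    else if word == "though" then true
    else false

def subpoint_enders : List String := [",", ":"]

def end_of_subpoint (word : String) : Bool :=
  match PySem.Str.pyGet? word (-1) with
  | none => false
  | some c =>
    if subpoint_enders.contains (String.ofList [c]) then true
    else if word == "and" then true
    else false

-- s.split(sep) with a nonempty literal sep: split? is always 'some' there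
def string_to_record_linewise (medical_record : String) : List String :=
  (PySem.Str.split? medical_record "\n").getD []

def load_medical_record_linewise (medical_record : String) : List (List String) :=
  let recordFile := string_to_record_linewise medical_record
  let sentences := recordFile.foldl (fun sentences line =>
    if !(PySem.Str.isIn ":" line) then sentences
    else
      let st := ((PySem.Str.split? (PySem.Str.strip line) " ").getD []).foldl
        (fun (st : List String × List String) word =>
          let word := PySem.Str.lower word
          if PySem.Str.len word < 1 then st
          else
            let curSentence := st.2 ++ [word]
            if end_of_point word then (st.1 ++ [PySem.Str.join " " curSentence], [])
            else (st.1, curSentence))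
        (sentences, [])
      if st.2.length > 0 then st.1 ++ [PySem.Str.join " " st.2] else st.1) []
  sentences.foldl (fun subsentence_sets sent =>
    let st := ((PySem.Str.split? sent " ").getD []).foldl
      (fun (st : List String × List String) word =>
        let word := PySem.Str.lower word
        let curSubsent := st.2 ++ [word]
        if end_of_subpoint word then (st.1 ++ [PySem.Str.join " " curSubsent], [])
        else (st.1, curSubsent))
      ([], [])
    let subsents := if st.2.length > 0 then st.1 ++ [PySem.Str.join " " st.2] else st.1
    subsentence_sets ++ [subsents]) []

-- ===== PORT B =====
def pointChars : PySem.Set String := PySem.Set.ofList [".", "\u2022", ";", "\t"]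
def pointWords : PySem.Set String := PySem.Set.ofList ["but", "except", "however", "though"]
def subChars : PySem.Set String := PySem.Set.ofList [",", ":"]

-- B only calls these on nonempty words (word[-1] would raise on "")
def endsPoint (word : String) : Bool :=
  (match PySem.Str.pyGet? word (-1) with
   | none => false
   | some c => PySem.Set.contains pointChars (String.ofList [c]))
  || PySem.Set.contains pointWords word

def endsSubpoint (word : String) : Bool :=
  (match PySem.Str.pyGet? word (-1) with
   | none => false
   | some c => PySem.Set.contains subChars (String.ofList [c]))
  || word == "and"

def load_medical_record_linewise_alt (medical_record : String) : List (List String) :=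
  ((PySem.Str.split? medical_record "\n").getD []).foldl (fun result line =>
    if !(PySem.Str.isIn ":" line) then result
    else
      let st := ((PySem.Str.split? (PySem.Str.strip line) " ").getD []).foldl
        (fun (st : List (List String) × List String × List String) raw =>
          let word := PySem.Str.lower raw
          if word == "" then st
          else
            let curSubsent := st.2.2 ++ [word]
            if endsPoint word then
              (st.1 ++ [st.2.1 ++ [PySem.Str.join " " curSubsent]], [], [])
            else if endsSubpoint word then
              (st.1, st.2.1 ++ [PySem.Str.join " " curSubsent], [])
            else (st.1, st.2.1, curSubsent))
        (result, [], [])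
      let curSentence := if st.2.2 != [] then st.2.1 ++ [PySem.Str.join " " st.2.2] else st.2.1
      if curSentence != [] then st.1 ++ [curSentence] else st.1) []

-- ===== PRECONDITION & SPEC =====
def Spec_load_medical_record_linewise (medical_record : String) (out : List (List String)) : Prop := out = load_medical_record_linewise_alt medical_record
instance (medical_record : String) (out : List (List String)) : Decidable (Spec_load_medical_record_linewise medical_record out) := by unfold Spec_load_medical_record_linewise; infer_instance

-- ===== CLAIM (what is proved, stated in full; the proofs are below) =====
def Claim_equal_load_medical_record_linewise : Prop := ∀ (medical_record : String), Dom_load_medical_record_linewise medical_record → Spec_load_medical_record_linewise medical_record (load_medical_record_linewise medical_record)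

-- ===== LEMMAS AND PROOFS =====

-- proof-side helpers: the common "one group pass" semantics both programs compute

def wjoin (ws : List String) : String := PySem.Str.join " " ws

def sStep (st : List String × List String) (w : String) : List String × List String :=
  if end_of_subpoint w then (st.1 ++ [wjoin (st.2 ++ [w])], []) else (st.1, st.2 ++ [w])

def gStep (st : List (List String) × List String) (w : String) : List (List String) × List String :=
  if end_of_point w then (st.1 ++ [st.2 ++ [w]], []) else (st.1, st.2 ++ [w])

def subs (g : List String) : List String :=
  let st := g.foldl sStep ([], [])
  if st.2 ≠ [] then st.1 ++ [wjoin st.2] else st.1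

def lineGroups (ws : List String) : List (List String) :=
  let st := ws.foldl gStep ([], [])
  if st.2 ≠ [] then st.1 ++ [st.2] else st.1

def cleanWords (raws : List String) : List String :=
  (raws.map PySem.Str.lower).filter (fun w => !(w == ""))

def wordsOf (line : String) : List String :=
  cleanWords ((PySem.Str.split? (PySem.Str.strip line) " ").getD [])

def Common (mr : String) : List (List String) :=
  ((PySem.Str.split? mr "\n").getD []).flatMap
    (fun line => if PySem.Str.isIn ":" line then (lineGroups (wordsOf line)).map subs else [])

def goodWord (w : String) : Prop := w ≠ "" ∧ ' ' ∉ w.toList ∧ PySem.Str.lower w = w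

-- ===== generic split/join bridge lemmas =====

theorem go_splitOn (c : Char) : ∀ (fuel : Nat) (l cur : List Char) (acc : List (List Char)), l.length < fuel →
    PySem.Chars.splitOn.go [c] fuel l cur acc
      = acc.reverse ++ (List.splitOn c l).modifyHead (cur.reverse ++ ·) := by
  intro fuel
  induction fuel with
  | zero => intro l cur acc h; omega
  | succ n ih =>
    intro l cur acc h
    cases l with
    | nil =>
      rw [PySem.Chars.splitOn.go.eq_def]
      simp [List.splitOn, List.splitOnP_nil]
    | cons ch rest =>
      rw [PySem.Chars.splitOn.go.eq_def]
      by_cases hc : c = ch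
      · subst hc
        have hpre : [c].isPrefixOf (c :: rest) = true := by simp [List.isPrefixOf]
        simp only [hpre, if_pos]
        rw [ih _ _ _ (by simpa using Nat.lt_of_succ_lt_succ h)]
        simp [List.splitOn, List.splitOnP_cons]
        exact congrFun List.modifyHead_id _
      · have hpre : [c].isPrefixOf (ch :: rest) = false := by simp [List.isPrefixOf, hc]
        simp only [hpre, Bool.false_eq_true, if_false]
        rw [ih _ _ _ (by simpa using Nat.lt_of_succ_lt_succ h)]
        have hne : (ch == c) = false := by simp; exact fun h => hc h.symm
        simp [List.splitOn, List.splitOnP_cons, hne]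
        cases hsp : List.splitOnP (fun x => x == c) rest with
        | nil => exact absurd hsp (List.splitOnP_ne_nil _ _)
        | cons hd tl => simp

theorem chars_splitOn_single (c : Char) (s : List Char) :
    PySem.Chars.splitOn s [c] = List.splitOn c s := by
  rw [PySem.Chars.splitOn, go_splitOn c _ _ _ _ (Nat.lt_succ_self _)]
  have := List.splitOnP_ne_nil (fun x => x == c) s
  cases hsp : List.splitOn c s with
  | nil => exact absurd hsp (by simpa [List.splitOn] using this)
  | cons hd tl => simp

theorem mem_splitOnP {p : Char → Bool} : ∀ {s l : List Char}, l ∈ List.splitOnP p s → ∀ x ∈ l, p x = false := by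
  intro s
  induction s with
  | nil => intro l hl; simp [List.splitOnP_nil] at hl; simp [hl]
  | cons a s ih =>
    intro l hl x hx
    rw [List.splitOnP_cons] at hl
    by_cases hp : p a = true
    · simp [hp] at hl
      rcases hl with h | h
      · simp [h] at hx
      · exact ih h x hx
    · simp [hp] at hl
      cases hsp : List.splitOnP p s with
      | nil => exact absurd hsp (List.splitOnP_ne_nil _ _)
      | cons hd tl =>
        rw [hsp] at hl
        simp at hl
        rcases hl with h | h
        · subst h; rcases List.mem_cons.mp hx with rfl | hx'
          · simpa using hp
          · exact ih (hsp ▸ List.mem_cons_self) x hx'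
        · exact ih (hsp ▸ List.mem_cons_of_mem _ h) x hx

-- Python ".split(' ')" round-trips " ".join(ws) for nonempty space-free words
theorem split_join_roundtrip (ws : List String) (hne : ws ≠ [])
    (hw : ∀ w ∈ ws, ' ' ∉ w.toList) :
    (PySem.Str.split? (wjoin ws) " ").getD [] = ws := by
  rw [wjoin, PySem.Str.split?, PySem.Chars.split?]
  simp only [PySem.Str.join, String.toList_ofList]
  have hsep : (" ".toList : List Char) = [' '] := by decide
  rw [hsep]
  simp only [List.isEmpty_cons]
  rw [if_neg (by simp)]
  rw [chars_splitOn_single]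
  rw [show PySem.Chars.join [' '] (ws.map String.toList) = [' '].intercalate (ws.map String.toList) from rfl]
  rw [List.splitOn_intercalate _ _ (by intro l hl; simp at hl; obtain ⟨w, hw', rfl⟩ := hl; exact hw w hw') (by simpa using hne)]
  simp [Option.getD, List.map_map, Function.comp_def]

-- ===== lowercase lemmas =====

theorem isupper_iff (c : Char) : PySem.Chars.isupper c = true ↔ 65 ≤ c.toNat ∧ c.toNat ≤ 90 := by
  simp [PySem.Chars.isupper, Char.le_def]
  constructor
  · rintro ⟨h1, h2⟩; exact ⟨h1, h2⟩
  · rintro ⟨h1, h2⟩; exact ⟨h1, h2⟩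

theorem lowerChar_idem (c : Char) : PySem.Chars.lowerChar (PySem.Chars.lowerChar c) = PySem.Chars.lowerChar c := by
  unfold PySem.Chars.lowerChar
  by_cases h : PySem.Chars.isupper c = true
  · rw [if_pos h]
    obtain ⟨h1, h2⟩ := (isupper_iff c).mp h
    have ht : (Char.ofNat (c.toNat + 32)).toNat = c.toNat + 32 := by
      rw [Char.toNat_ofNat, if_pos (by simp [Nat.isValidChar]; omega)]
    rw [if_neg]
    intro hu
    obtain ⟨h3, h4⟩ := (isupper_iff _).mp hu
    omega
  · rw [if_neg h, if_neg h]

theorem lowerChar_ne_space (c : Char) (h : c ≠ ' ') : PySem.Chars.lowerChar c ≠ ' ' := by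
  unfold PySem.Chars.lowerChar
  by_cases hu : PySem.Chars.isupper c = true
  · rw [if_pos hu]
    obtain ⟨h1, h2⟩ := (isupper_iff c).mp hu
    have ht : (Char.ofNat (c.toNat + 32)).toNat = c.toNat + 32 := by
      rw [Char.toNat_ofNat, if_pos (by simp [Nat.isValidChar]; omega)]
    intro he
    have : (Char.ofNat (c.toNat + 32)).toNat = (' ' : Char).toNat := by rw [he]
    simp [ht] at this
    omega
  · rw [if_neg hu]; exact h

theorem str_lower_idem (w : String) : PySem.Str.lower (PySem.Str.lower w) = PySem.Str.lower w := by
  unfold PySem.Str.lower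
  congr 1
  rw [String.toList_ofList]
  unfold PySem.Chars.lower
  rw [List.map_map]
  exact List.map_congr_left (fun c _ => lowerChar_idem c)

theorem lower_no_space (w : String) (h : ' ' ∉ w.toList) : ' ' ∉ (PySem.Str.lower w).toList := by
  rw [PySem.Str.toList_lower]
  unfold PySem.Chars.lower
  intro hm
  simp at hm
  obtain ⟨c, hc, he⟩ := hm
  exact lowerChar_ne_space c (fun hh => h (hh ▸ hc)) he

-- ===== helper-predicate lemmas =====

theorem endsPoint_eq (w : String) : endsPoint w = end_of_point w := by
  unfold endsPoint end_of_point
  cases hg : PySem.Str.pyGet? w (-1) with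
  | none =>
    have hnil : w = "" := by
      simp [PySem.List.pyGet?_eq_none_iff] at hg
      cases hl : w.toList with
      | nil => have := congrArg String.ofList hl; simpa using this
      | cons a l =>
        exfalso; apply hg
        have hlen : w.length = l.length + 1 := by rw [← String.length_toList, hl]; rfl
        simp [PySem.Raise.InRange, hlen]
    subst hnil
    simp [pointWords]
  | some c =>
    simp only [point_enders, pointChars, pointWords, PySem.Set.ofList]
    by_cases h1 : String.ofList [c] = "."
    · simp [h1]
    · by_cases h2 : String.ofList [c] = "\u2022"
      · simp [h2]
      · by_cases h3 : String.ofList [c] = ";"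
        · simp [h3]
        · by_cases h4 : String.ofList [c] = "\t"
          · simp [h4]
          · by_cases hb : w = "but" <;> by_cases he : w = "except" <;>
              by_cases hh : w = "however" <;> by_cases ht : w = "though" <;>
              simp_all

theorem endsSubpoint_eq (w : String) : endsSubpoint w = end_of_subpoint w := by
  unfold endsSubpoint end_of_subpoint
  cases hg : PySem.Str.pyGet? w (-1) with
  | none =>
    have hnil : w = "" := by
      simp [PySem.List.pyGet?_eq_none_iff] at hg
      cases hl : w.toList with
      | nil => have := congrArg String.ofList hl; simpa using this
      | cons a l =>
        exfalso; apply hg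
        have hlen : w.length = l.length + 1 := by rw [← String.length_toList, hl]; rfl
        simp [PySem.Raise.InRange, hlen]
    subst hnil
    decide
  | some c =>
    simp only [subpoint_enders, subChars, PySem.Set.ofList]
    by_cases h1 : String.ofList [c] = ","
    · simp [h1]
    · by_cases h2 : String.ofList [c] = ":"
      · simp [h2]
      · by_cases ha : w = "and" <;> simp_all

theorem ofList_single_eq_lit (c d : Char) : (String.ofList [c] = String.ofList [d]) ↔ c = d := by
  constructor
  · intro h; have := congrArg String.toList h; simpa using this
  · intro h; rw [h]

theorem point_subpoint_disjoint (w : String) (hne : w ≠ "")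
    (hp : end_of_point w = true) : end_of_subpoint w = false := by
  unfold end_of_point at hp
  unfold end_of_subpoint
  cases hg : PySem.Str.pyGet? w (-1) with
  | none => rfl
  | some c =>
    simp only [point_enders] at hp
    by_cases h1 : List.contains [".", "\u2022", "\u2022", ";", "\t"] (String.ofList [c]) = true
    · have hc : c = '.' ∨ c = '\u2022' ∨ c = ';' ∨ c = '\t' := by
        have e1 : ("." : String) = String.ofList ['.'] := by decide
        have e2 : ("\u2022" : String) = String.ofList ['\u2022'] := by decide
        have e3 : ((";") : String) = String.ofList [';'] := by decide
        have e4 : ("\t" : String) = String.ofList ['\t'] := by decide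
        rw [e1, e2, e3, e4] at h1
        simp only [List.contains_cons, List.contains_nil, Bool.or_eq_true, beq_iff_eq,
          ofList_single_eq_lit] at h1
        tauto
      have hsub : List.contains subpoint_enders (String.ofList [c]) = false := by
        rcases hc with rfl | rfl | rfl | rfl <;> decide
      have hand : w ≠ "and" := by
        intro h; subst h
        have hcd : c = 'd' := by
          have h5 : PySem.Str.pyGet? "and" (-1) = some 'd' := by decide
          rw [h5] at hg; exact (Option.some_inj.mp hg).symm
        subst hcd
        rcases hc with h | h | h | h <;> simp at h
      have hsub' : String.ofList [c] ∉ subpoint_enders := by simpa using hsub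
      simp [hsub', hand]
    · have h1m : String.ofList [c] ∉ [".", "\u2022", "\u2022", ";", "\t"] := by simpa using h1
      by_cases hb : w = "but"
      · subst hb
        have hcl : c = 't' := by
          have h5 : PySem.Str.pyGet? "but" (-1) = some 't' := by decide
          rw [h5] at hg; exact (Option.some_inj.mp hg).symm
        subst hcl; decide
      · by_cases hx : w = "except"
        · subst hx
          have hcl : c = 't' := by
            have h5 : PySem.Str.pyGet? "except" (-1) = some 't' := by decide
            rw [h5] at hg; exact (Option.some_inj.mp hg).symm
          subst hcl; decide
        · by_cases hh : w = "however"
          · subst hh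
            have hcl : c = 'r' := by
              have h5 : PySem.Str.pyGet? "however" (-1) = some 'r' := by decide
              rw [h5] at hg; exact (Option.some_inj.mp hg).symm
            subst hcl; decide
          · by_cases ht : w = "though"
            · subst ht
              have hcl : c = 'h' := by
                have h5 : PySem.Str.pyGet? "though" (-1) = some 'h' := by decide
                rw [h5] at hg; exact (Option.some_inj.mp hg).symm
              subst hcl; decide
            · have hg' : PySem.List.pyGet? w.toList (-1) = some c := by simpa using hg
              simp [hg', h1m, hb, hx, hh, ht] at hp

-- ===== goodness of the word stream =====

theorem split_space_eq (s : String) :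
    (PySem.Str.split? s " ").getD [] = (List.splitOn ' ' s.toList).map String.ofList := by
  rw [PySem.Str.split?, PySem.Chars.split?]
  rw [show (" " : String).toList = [' '] from by decide]
  rw [if_neg (by simp)]
  rw [chars_splitOn_single]
  simp

theorem wordsOf_good (line : String) : ∀ w ∈ wordsOf line, goodWord w := by
  intro w hw
  unfold wordsOf cleanWords at hw
  rw [split_space_eq] at hw
  simp only [List.mem_filter, List.mem_map] at hw
  obtain ⟨⟨r, hr, rfl⟩, hne⟩ := hw
  obtain ⟨l, hl, rfl⟩ := hr
  refine ⟨by simpa using hne, ?_, str_lower_idem _⟩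
  apply lower_no_space
  rw [String.toList_ofList]
  intro hsp
  have := mem_splitOnP (p := fun x => x == ' ') (by simpa [List.splitOn] using hl) ' ' hsp
  simp at this

theorem gfold_good (P : String → Prop) : ∀ (ws : List String) (gs : List (List String)) (cur : List String),
    (∀ g ∈ gs, g ≠ [] ∧ ∀ w ∈ g, P w) → (∀ w ∈ cur, P w) → (∀ w ∈ ws, P w) →
    (∀ g ∈ (ws.foldl gStep (gs, cur)).1, g ≠ [] ∧ ∀ w ∈ g, P w) ∧
      (∀ w ∈ (ws.foldl gStep (gs, cur)).2, P w) := by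
  intro ws
  induction ws with
  | nil => intro gs cur h1 h2 _; exact ⟨h1, h2⟩
  | cons w ws ih =>
    intro gs cur h1 h2 h3
    simp only [List.foldl_cons, gStep]
    by_cases hpt : end_of_point w = true
    · rw [if_pos hpt]
      refine ih _ _ ?_ (by simp) (fun x hx => h3 x (List.mem_cons_of_mem _ hx))
      intro g hg
      rcases List.mem_append.mp hg with h | h
      · exact h1 g h
      · have hgq : g = cur ++ [w] := by simpa using h
        subst hgq
        refine ⟨by simp, ?_⟩
        intro x hx
        rcases List.mem_append.mp hx with h' | h'
        · exact h2 x h'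
        · simpa [List.eq_of_mem_singleton h'] using h3 w List.mem_cons_self
    · rw [if_neg hpt]
      refine ih _ _ h1 ?_ (fun x hx => h3 x (List.mem_cons_of_mem _ hx))
      intro x hx
      rcases List.mem_append.mp hx with h' | h'
      · exact h2 x h'
      · simpa [List.eq_of_mem_singleton h'] using h3 w List.mem_cons_self

theorem lineGroups_good (ws : List String) (h : ∀ w ∈ ws, goodWord w) :
    ∀ g ∈ lineGroups ws, g ≠ [] ∧ ∀ w ∈ g, goodWord w := by
  intro g hg
  unfold lineGroups at hg
  obtain ⟨h1, h2⟩ := gfold_good goodWord ws [] [] (by simp) (by simp) h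
  by_cases hc : (ws.foldl gStep ([], [])).2 ≠ []
  · rw [if_pos hc] at hg
    rcases List.mem_append.mp hg with hm | hm
    · exact h1 g hm
    · have : g = (ws.foldl gStep ([], [])).2 := by simpa using hm
      subst this
      exact ⟨hc, h2⟩
  · rw [if_neg hc] at hg
    exact h1 g hg

-- ===== fold-shape lemmas =====

-- folding a "lower, skip empty, act" body equals folding the action over the cleaned words
theorem foldl_clean {σ : Type} (f : σ → String → σ) : ∀ (raws : List String) (st : σ),
    raws.foldl (fun st w => if PySem.Str.lower w == "" then st else f st (PySem.Str.lower w)) st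
      = (cleanWords raws).foldl f st := by
  intro raws
  induction raws with
  | nil => intro st; simp [cleanWords]
  | cons r rs ih =>
    intro st
    by_cases h : PySem.Str.lower r == ""
    · simp only [List.foldl_cons, h, if_pos]
      rw [ih]
      simp [cleanWords, h]
    · simp only [List.foldl_cons, h, Bool.false_eq_true, if_false]
      rw [ih]
      simp [cleanWords, h]

def aStep (st : List String × List String) (w : String) : List String × List String :=
  if end_of_point w then (st.1 ++ [wjoin (st.2 ++ [w])], []) else (st.1, st.2 ++ [w])

theorem foldl_aStep : ∀ (ws : List String) (S : List String) (gs : List (List String)) (cur : List String),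
    ws.foldl aStep (S ++ gs.map wjoin, cur)
      = (S ++ ((ws.foldl gStep (gs, cur)).1).map wjoin, (ws.foldl gStep (gs, cur)).2) := by
  intro ws
  induction ws with
  | nil => intro S gs cur; rfl
  | cons w ws ih =>
    intro S gs cur
    simp only [List.foldl_cons, aStep, gStep]
    by_cases hpt : end_of_point w = true
    · rw [if_pos hpt, if_pos hpt]
      have : S ++ gs.map wjoin ++ [wjoin (cur ++ [w])] = S ++ (gs ++ [cur ++ [w]]).map wjoin := by
        simp
      rw [this, ih]
    · rw [if_neg hpt, if_neg hpt]
      exact ih S gs (cur ++ [w])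

theorem gfold_prefix : ∀ (ws : List String) (gs : List (List String)) (cur : List String),
    ws.foldl gStep (gs, cur)
      = (gs ++ (ws.foldl gStep ([], cur)).1, (ws.foldl gStep ([], cur)).2) := by
  intro ws
  induction ws with
  | nil => intro gs cur; simp
  | cons w ws ih =>
    intro gs cur
    simp only [List.foldl_cons, gStep, List.nil_append]
    by_cases hpt : end_of_point w = true
    · rw [if_pos hpt, if_pos hpt]
      rw [ih (gs ++ [cur ++ [w]]) [], ih [cur ++ [w]] []]
      simp
    · rw [if_neg hpt, if_neg hpt]
      exact ih gs (cur ++ [w])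

theorem subs_ne_nil (g : List String) (h : g ≠ []) : subs g ≠ [] := by
  obtain ⟨init, w, rfl⟩ := (List.eq_nil_or_concat g).resolve_left h
  unfold subs
  simp only [List.concat_eq_append, List.foldl_append]
  simp only [List.foldl_cons, List.foldl_nil, sStep]
  by_cases hs : end_of_subpoint w = true
  · rw [if_pos hs]; simp
  · rw [if_neg hs]; simp

-- the sentence-level pass of A applied to a joined group of good words
theorem pass2_join (g : List String) (hne : g ≠ []) (hg : ∀ w ∈ g, goodWord w) :
    (let st := ((PySem.Str.split? (wjoin g) " ").getD []).foldl
        (fun st w => sStep st (PySem.Str.lower w)) (([] : List String), ([] : List String))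
     if st.2.length > 0 then st.1 ++ [wjoin st.2] else st.1)
      = subs g := by
  rw [split_join_roundtrip g hne (fun w hw => (hg w hw).2.1)]
  rw [PySem.List.foldl_congr_mem g _ sStep _
    (fun acc w hw => by rw [(hg w hw).2.2])]
  unfold subs
  by_cases hc : (g.foldl sStep ([], [])).2 = []
  · simp [hc]
  · have : (g.foldl sStep ([], [])).2.length > 0 := List.length_pos_of_ne_nil hc
    simp [hc, this]

-- ===== A = Common =====

def sentsOfLine (line : String) : List String :=
  if PySem.Str.isIn ":" line then (lineGroups (wordsOf line)).map wjoin else []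

theorem A_line (S : List String) (line : String) :
    (if !(PySem.Str.isIn ":" line) then S
     else
       let st := ((PySem.Str.split? (PySem.Str.strip line) " ").getD []).foldl
         (fun (st : List String × List String) word =>
           let word := PySem.Str.lower word
           if PySem.Str.len word < 1 then st
           else
             let curSentence := st.2 ++ [word]
             if end_of_point word then (st.1 ++ [PySem.Str.join " " curSentence], [])
             else (st.1, curSentence))
         (S, [])
       if st.2.length > 0 then st.1 ++ [PySem.Str.join " " st.2] else st.1)
      = S ++ sentsOfLine line := by
  unfold sentsOfLine
  by_cases hc : PySem.Str.isIn ":" line = true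
  · rw [if_neg (show ¬((!PySem.Str.isIn ":" line) = true) by rw [hc]; simp), if_pos hc]
    have hbody : ∀ (st : List String × List String) (w : String),
        (let word := PySem.Str.lower w
         if PySem.Str.len word < 1 then st
         else
           let curSentence := st.2 ++ [word]
           if end_of_point word then (st.1 ++ [PySem.Str.join " " curSentence], [])
           else (st.1, curSentence))
          = if PySem.Str.lower w == "" then st else aStep st (PySem.Str.lower w) := by
      intro st w
      by_cases he : PySem.Str.lower w = ""
      · have : PySem.Str.len (PySem.Str.lower w) < 1 := by
          rw [he]; simp [PySem.Str.len]
        rw [if_pos this, if_pos (by simp [he])]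
      · have hlen : ¬ PySem.Str.len (PySem.Str.lower w) < 1 := by
          simp only [PySem.Str.len]
          have : (PySem.Str.lower w).toList ≠ [] := by
            intro hnil
            apply he
            have h2 := congrArg String.ofList hnil
            rw [String.ofList_toList] at h2
            exact h2.trans (by decide)
          have : 0 < (PySem.Str.lower w).toList.length := List.length_pos_of_ne_nil this
          omega
        simp only [hlen, if_false, he, beq_iff_eq, aStep, wjoin]
    rw [PySem.List.foldl_congr_mem _ _
      (fun st w => if PySem.Str.lower w == "" then st else aStep st (PySem.Str.lower w)) _
      (fun acc w _ => hbody acc w)]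
    rw [foldl_clean]
    have := foldl_aStep (wordsOf line) S [] []
    simp only [List.map_nil, List.append_nil] at this
    unfold wordsOf at this ⊢
    rw [this]
    unfold lineGroups
    by_cases h2 : (((cleanWords ((PySem.Str.split? (PySem.Str.strip line) " ").getD [])).foldl gStep ([], [])).2) = []
    · simp [h2]
    · have : (((cleanWords ((PySem.Str.split? (PySem.Str.strip line) " ").getD [])).foldl gStep ([], [])).2).length > 0 :=
        List.length_pos_of_ne_nil h2
      simp [h2, this, wjoin]
  · have hcf : PySem.Str.isIn ":" line = false := by
      cases h' : PySem.Str.isIn ":" line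
      · rfl
      · exact absurd h' hc
    rw [if_pos (show (!PySem.Str.isIn ":" line) = true by rw [hcf]; rfl), if_neg hc]
    simp

theorem A_eq_common (mr : String) : load_medical_record_linewise mr = Common mr := by
  simp only [load_medical_record_linewise, string_to_record_linewise, Common]
  rw [PySem.List.foldl_congr_mem _ _
    (fun (S : List String) line => S ++ sentsOfLine line) _
    (fun acc line _ => A_line acc line)]
  rw [PySem.List.foldl_append_eq_flatMap sentsOfLine _ []]
  rw [PySem.List.foldl_append_singleton_eq_map]
  simp only [List.nil_append, List.map_flatMap]
  apply List.flatMap_congr  -- maybe wrong name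
  intro line _
  unfold sentsOfLine
  by_cases hc : PySem.Str.isIn ":" line = true
  · rw [if_pos hc, if_pos hc]
    rw [List.map_map]
    apply List.map_congr_left
    intro g hg
    obtain ⟨hne, hgood⟩ := lineGroups_good _ (wordsOf_good line) g hg
    simpa using pass2_join g hne hgood
  · rw [if_neg hc, if_neg hc]
    simp

-- ===== B = Common =====

def bStep (st : List (List String) × List String × List String) (w : String) :
    List (List String) × List String × List String :=
  if end_of_point w then (st.1 ++ [st.2.1 ++ [wjoin (st.2.2 ++ [w])]], [], [])
  else if end_of_subpoint w then (st.1, st.2.1 ++ [wjoin (st.2.2 ++ [w])], [])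
  else (st.1, st.2.1, st.2.2 ++ [w])

def lineGroupsFrom (cur ws : List String) : List (List String) :=
  let st := ws.foldl gStep ([], cur)
  if st.2 ≠ [] then st.1 ++ [st.2] else st.1

def bFinish (st : List (List String) × List String × List String) : List (List String) :=
  let cs := if st.2.2 ≠ [] then st.2.1 ++ [wjoin st.2.2] else st.2.1
  if cs ≠ [] then st.1 ++ [cs] else st.1

theorem B_inner : ∀ (ws : List String) (res : List (List String)) (cur : List String),
    (∀ w ∈ cur, goodWord w) → (∀ w ∈ ws, goodWord w) →
    bFinish (ws.foldl bStep (res, (cur.foldl sStep ([], [])).1, (cur.foldl sStep ([], [])).2))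
      = res ++ (lineGroupsFrom cur ws).map subs := by
  intro ws
  induction ws with
  | nil =>
    intro res cur hcur _
    by_cases h : cur = []
    · subst h
      simp [lineGroupsFrom, bFinish]
    · have hsubs : subs cur ≠ [] := subs_ne_nil cur h
      unfold subs at hsubs ⊢
      unfold lineGroupsFrom bFinish
      simp only [List.foldl_nil]
      rw [if_pos h]
      by_cases hc : (cur.foldl sStep ([], [])).2 = []
      · simp only [hc, ne_eq, not_true_eq_false, if_false] at hsubs ⊢
        rw [if_pos hsubs]
        simp [hc]
      · simp only [hc, ne_eq, not_false_eq_true, if_true] at hsubs ⊢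
        rw [if_pos (by simp)]
        simp [hc]
  | cons w ws ih =>
    intro res cur hcur hws
    have hw : goodWord w := hws w List.mem_cons_self
    have hws' : ∀ x ∈ ws, goodWord x := fun x hx => hws x (List.mem_cons_of_mem _ hx)
    simp only [List.foldl_cons, bStep]
    by_cases hpt : end_of_point w = true
    · rw [if_pos hpt]
      have hsub : end_of_subpoint w = false := point_subpoint_disjoint w hw.1 hpt
      have hflush : (cur.foldl sStep ([], [])).1 ++ [wjoin ((cur.foldl sStep ([], [])).2 ++ [w])]
          = subs (cur ++ [w]) := by
        unfold subs
        rw [List.foldl_append]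
        simp only [List.foldl_cons, List.foldl_nil, sStep, hsub, Bool.false_eq_true, if_false]
        rw [if_pos (by simp)]
      have := ih (res ++ [(cur.foldl sStep ([], [])).1 ++ [wjoin ((cur.foldl sStep ([], [])).2 ++ [w])]]) []
        (by simp) hws'
      simp only [List.foldl_nil] at this
      rw [this]
      rw [hflush]
      have hlg : lineGroupsFrom cur (w :: ws) = (cur ++ [w]) :: lineGroupsFrom [] ws := by
        unfold lineGroupsFrom
        simp only [List.foldl_cons, gStep, hpt, if_true, List.nil_append]
        rw [gfold_prefix ws [cur ++ [w]] []]
        by_cases hc : (ws.foldl gStep ([], [])).2 = []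
        · simp [hc]
        · simp [hc]
      rw [hlg]
      simp
    · rw [if_neg hpt]
      by_cases hsp : end_of_subpoint w = true
      · rw [if_pos hsp]
        have hstep : (cur ++ [w]).foldl sStep ([], []) =
            ((cur.foldl sStep ([], [])).1 ++ [wjoin ((cur.foldl sStep ([], [])).2 ++ [w])], []) := by
          rw [List.foldl_append]
          simp [sStep, hsp]
        have := ih res (cur ++ [w])
          (by intro x hx; rcases List.mem_append.mp hx with h | h
              · exact hcur x h
              · simpa [List.eq_of_mem_singleton h] using hw) hws'
        rw [hstep] at this
        simp only at this
        rw [this]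
        have hlg : lineGroupsFrom cur (w :: ws) = lineGroupsFrom (cur ++ [w]) ws := by
          unfold lineGroupsFrom
          simp [gStep, hpt]
        rw [hlg]
      · rw [if_neg hsp]
        have hstep : (cur ++ [w]).foldl sStep ([], []) =
            ((cur.foldl sStep ([], [])).1, (cur.foldl sStep ([], [])).2 ++ [w]) := by
          rw [List.foldl_append]
          simp [sStep, hsp]
        have := ih res (cur ++ [w])
          (by intro x hx; rcases List.mem_append.mp hx with h | h
              · exact hcur x h
              · simpa [List.eq_of_mem_singleton h] using hw) hws'
        rw [hstep] at this
        simp only at this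
        rw [this]
        have hlg : lineGroupsFrom cur (w :: ws) = lineGroupsFrom (cur ++ [w]) ws := by
          unfold lineGroupsFrom
          simp [gStep, hpt]
        rw [hlg]

theorem bFinish_eq (st : List (List String) × List String × List String) :
    (let curSentence := if st.2.2 != [] then st.2.1 ++ [PySem.Str.join " " st.2.2] else st.2.1
     if curSentence != [] then st.1 ++ [curSentence] else st.1) = bFinish st := by
  unfold bFinish
  simp only [bne_iff_ne, ne_eq, ite_not, wjoin]

theorem B_line (res : List (List String)) (line : String) :
    (if !(PySem.Str.isIn ":" line) then res
     else
       let st := ((PySem.Str.split? (PySem.Str.strip line) " ").getD []).foldl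
         (fun (st : List (List String) × List String × List String) raw =>
           let word := PySem.Str.lower raw
           if word == "" then st
           else
             let curSubsent := st.2.2 ++ [word]
             if endsPoint word then
               (st.1 ++ [st.2.1 ++ [PySem.Str.join " " curSubsent]], [], [])
             else if endsSubpoint word then
               (st.1, st.2.1 ++ [PySem.Str.join " " curSubsent], [])
             else (st.1, st.2.1, curSubsent))
         (res, [], [])
       let curSentence := if st.2.2 != [] then st.2.1 ++ [PySem.Str.join " " st.2.2] else st.2.1
       if curSentence != [] then st.1 ++ [curSentence] else st.1)
      = res ++ (if PySem.Str.isIn ":" line then (lineGroups (wordsOf line)).map subs else []) := by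
  by_cases hc : PySem.Str.isIn ":" line = true
  · rw [if_neg (show ¬((!PySem.Str.isIn ":" line) = true) by rw [hc]; simp), if_pos hc]
    have hbody : ∀ (st : List (List String) × List String × List String) (w : String),
        (let word := PySem.Str.lower w
         if word == "" then st
         else
           let curSubsent := st.2.2 ++ [word]
           if endsPoint word then
             (st.1 ++ [st.2.1 ++ [PySem.Str.join " " curSubsent]], [], [])
           else if endsSubpoint word then
             (st.1, st.2.1 ++ [PySem.Str.join " " curSubsent], [])
           else (st.1, st.2.1, curSubsent))
          = if PySem.Str.lower w == "" then st else bStep st (PySem.Str.lower w) := by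
      intro st w
      simp only [endsPoint_eq, endsSubpoint_eq, bStep, wjoin]
    rw [PySem.List.foldl_congr_mem _ _
      (fun st w => if PySem.Str.lower w == "" then st else bStep st (PySem.Str.lower w)) _
      (fun acc w _ => hbody acc w)]
    rw [foldl_clean]
    have hin := B_inner (cleanWords ((PySem.Str.split? (PySem.Str.strip line) " ").getD [])) res []
      (by simp) (wordsOf_good line)
    simp only [List.foldl_nil] at hin
    have hlg : lineGroupsFrom [] (cleanWords ((PySem.Str.split? (PySem.Str.strip line) " ").getD []))
        = lineGroups (wordsOf line) := by
      unfold lineGroupsFrom lineGroups wordsOf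
      rfl
    rw [hlg] at hin
    simp only [bFinish_eq]
    exact hin
  · have hcf : PySem.Str.isIn ":" line = false := by
      cases h' : PySem.Str.isIn ":" line
      · rfl
      · exact absurd h' hc
    rw [if_pos (show (!PySem.Str.isIn ":" line) = true by rw [hcf]; rfl), if_neg hc]
    simp

theorem B_eq_common (mr : String) : load_medical_record_linewise_alt mr = Common mr := by
  simp only [load_medical_record_linewise_alt, Common]
  rw [PySem.List.foldl_congr_mem _ _
    (fun (res : List (List String)) line =>
      res ++ (if PySem.Str.isIn ":" line then (lineGroups (wordsOf line)).map subs else [])) _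
    (fun acc line _ => B_line acc line)]
  rw [PySem.List.foldl_append_eq_flatMap _ _ []]
  simp

-- ===== VERDICT (by name: the statement is the Claim_ definition above) =====
theorem load_medical_record_linewise_spec : Claim_equal_load_medical_record_linewise := by
  intro mr _
  unfold Spec_load_medical_record_linewise
  rw [A_eq_common, B_eq_common]
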